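-- pv_equiv track=rewrite | github.com/gegemonTV/REnju_PY | renju_py/lib/helpful.py | key_getter
-- ===== SOURCE A (Python) =====
-- def key_getter(some_string):
--     ch=''
--     for i in range(2, len(some_string)):
--         if some_string[-i] == 'o' or some_string[-i] == 'x':
--             break
--         ch+=some_string[-i]
--     mass = []
--     for i in range(len(ch)):
--         mass.append(ch[i])
--     mass.reverse()
--     ch=''
--     for i in range(len(mass)):
--         ch+=mass[i]
--     return ch
-- ===== SOURCE B (Python) =====
-- def key_getter(some_string):
--     core = some_string[1:-1]
--     idx = max(core.rfind('o'), core.rfind('x'))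
--     return core[idx + 1:]
-- ===== Notes on version B (the rewrite author's own statement) =====
-- stated objective: simpler
-- what changed: B replaces A's backward character-collecting loop plus list-reverse-rejoin with one slice core = s[1:-1], a rightmost-marker search idx = max(core.rfind('o'), core.rfind('x')), and a direct slice core[idx+1:] -- no Python-level loop, no accumulator, no reversal.
import Mathlib
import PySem

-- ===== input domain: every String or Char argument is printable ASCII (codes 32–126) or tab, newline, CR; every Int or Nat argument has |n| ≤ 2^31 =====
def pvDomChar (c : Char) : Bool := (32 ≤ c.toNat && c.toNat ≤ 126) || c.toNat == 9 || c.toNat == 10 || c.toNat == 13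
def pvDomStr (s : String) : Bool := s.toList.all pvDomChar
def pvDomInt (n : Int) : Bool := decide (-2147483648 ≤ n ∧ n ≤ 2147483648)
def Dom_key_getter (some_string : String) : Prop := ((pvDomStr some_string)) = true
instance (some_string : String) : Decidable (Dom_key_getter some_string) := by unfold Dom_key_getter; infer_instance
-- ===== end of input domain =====

-- B extracts the tail of some_string[1:-1] after the rightmost 'o'/'x' with rfind and one slice,
-- instead of A's backward collecting loop plus reverse-and-rejoin; simpler, no per-character loop.

-- ===== PORT A =====
-- for i in range(2, len(some_string)): break on 'o'/'x', else ch += some_string[-i]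
def keyGetterScan (cs : List Char) : List Int → List Char → List Char
  | [], ch => ch
  | i :: rest, ch =>
    match PySem.Chars.pyGet? cs (-i) with
    | none => ch     -- IndexError; unreachable: every i in range(2, len cs) indexes in range
    | some c => if c = 'o' ∨ c = 'x' then ch else keyGetterScan cs rest (ch ++ [c])

def key_getter (some_string : String) : String :=
  let cs := some_string.toList
  let ch := keyGetterScan cs (PySem.List.pyRange 2 (PySem.Str.len some_string) 1) []
  -- mass = []; for i in range(len(ch)): mass.append(ch[i])
  let mass := (PySem.List.pyRange 0 (PySem.List.len ch) 1).foldl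
      (fun m i => m ++ [PySem.List.pyGetD ch i ' ']) []
  -- mass.reverse()
  let mass := mass.reverse
  -- ch = ''; for i in range(len(mass)): ch += mass[i]
  let ch2 := (PySem.List.pyRange 0 (PySem.List.len mass) 1).foldl
      (fun acc i => acc ++ [PySem.List.pyGetD mass i ' ']) []
  String.ofList ch2

-- ===== PORT B =====
def key_getter_alt (some_string : String) : String :=
  let core := PySem.Str.slice some_string (some 1) (some (-1))
  let idx := max (PySem.Str.rfind core "o") (PySem.Str.rfind core "x")
  PySem.Str.slice core (some (idx + 1)) none

-- ===== PRECONDITION & SPEC =====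
def Spec_key_getter (some_string : String) (out : String) : Prop := out = key_getter_alt some_string
instance (some_string : String) (out : String) : Decidable (Spec_key_getter some_string out) := by unfold Spec_key_getter; infer_instance

-- ===== CLAIM (what is proved, stated in full; the proofs are below) =====
def Claim_equal_key_getter : Prop := ∀ (some_string : String), Dom_key_getter some_string → Spec_key_getter some_string (key_getter some_string)

-- ===== LEMMAS AND PROOFS =====

theorem pv_go_succ (l : List Char) (c : Char) (k : Nat) :
    PySem.Chars.rfind.go l [c] (k+1)
      = if [c].isPrefixOf (l.drop (k+1)) then ((k : Int)+1) else PySem.Chars.rfind.go l [c] k := by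
  rw [PySem.Chars.rfind.go]; push_cast; rfl
theorem pv_go_zero (l : List Char) (c : Char) :
    PySem.Chars.rfind.go l [c] 0 = if [c].isPrefixOf l then 0 else -1 := by
  rw [PySem.Chars.rfind.go]

theorem pv_go_append_ne (l : List Char) (a c : Char) (h : a ≠ c) :
    ∀ k, k ≤ l.length → PySem.Chars.rfind.go (l ++ [a]) [c] k = PySem.Chars.rfind.go l [c] k := by
  intro k
  induction k with
  | zero =>
    intro _
    rw [pv_go_zero, pv_go_zero]
    cases l with
    | nil => simp [List.isPrefixOf]; exact fun hc => h hc.symm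
    | cons x xs => simp [List.isPrefixOf]
  | succ j ih =>
    intro hk
    rw [pv_go_succ, pv_go_succ]
    have hd : List.drop (j+1) (l ++ [a]) = List.drop (j+1) l ++ [a] := by
      rw [List.drop_append_of_le_length hk]
    rw [hd]
    rcases Nat.lt_or_ge (j+1) l.length with hlt | hge
    · -- drop (j+1) l nonempty
      have hne : List.drop (j+1) l ≠ [] := by
        simp [List.drop_eq_nil_iff]; omega
      cases hdl : List.drop (j+1) l with
      | nil => exact absurd hdl hne
      | cons x xs => simp [hdl, List.isPrefixOf, ih (by omega)]
    · have : j + 1 = l.length := by omega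
      have hdl : List.drop (j+1) l = [] := by simp [List.drop_eq_nil_iff]; omega
      rw [hdl]
      simp [List.isPrefixOf, ih (by omega)]
      exact fun hc => absurd hc.symm h

theorem pv_rfind_nil (c : Char) : PySem.Chars.rfind [] [c] = -1 := by
  have : PySem.Chars.rfind ([] : List Char) [c] = PySem.Chars.rfind.go [] [c] 0 := rfl
  rw [this, pv_go_zero]; simp [List.isPrefixOf]

theorem pv_rfind_append (l : List Char) (a c : Char) :
    PySem.Chars.rfind (l ++ [a]) [c]
      = if a = c then (l.length : Int) else PySem.Chars.rfind l [c] := by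
  unfold PySem.Chars.rfind
  have hlen : (l ++ [a]).length = l.length + 1 := by simp
  rw [hlen, pv_go_succ]
  have hd0 : List.drop (l.length + 1) (l ++ [a]) = [] := by
    apply List.drop_eq_nil_of_le; simp
  rw [hd0]
  simp only [List.isPrefixOf, Bool.false_eq_true, if_false]
  cases hl : l.length with
  | zero =>
    have hnil : l = [] := List.eq_nil_of_length_eq_zero hl
    subst hnil
    rw [pv_go_zero, pv_go_zero]
    simp only [List.nil_append, List.isPrefixOf, List.isPrefixOf_nil_left]
    by_cases hac : a = c
    · subst hac; simp
    · have : (c == a) = false := by simp; exact fun hc => hac hc.symm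
      simp [this, hac, List.isPrefixOf]
  | succ j =>
    rw [pv_go_succ]
    have hdj : List.drop (j + 1) (l ++ [a]) = List.drop (j + 1) l ++ [a] := by
      rw [List.drop_append_of_le_length (by omega)]
    have hdl : List.drop (j + 1) l = [] := by
      apply List.drop_eq_nil_of_le; omega
    rw [hdj, hdl, List.nil_append]
    by_cases hac : a = c
    · subst hac; simp [List.isPrefixOf, hl]
    · have hba : (c == a) = false := by simp; exact fun hc => hac hc.symm
      simp only [List.isPrefixOf, hba, Bool.and_eq_true, Bool.false_eq_true, false_and, if_false,
        hac]
      rw [pv_go_append_ne l a c hac j (by omega), pv_go_succ, hdl]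
      simp [List.isPrefixOf]


theorem pv_rfind_bounds (l : List Char) (c : Char) :
    -1 ≤ PySem.Chars.rfind l [c] ∧ PySem.Chars.rfind l [c] < (l.length : Int) := by
  induction l using List.reverseRecOn with
  | nil => rw [pv_rfind_nil]; norm_num
  | append_singleton t a ih =>
    rw [pv_rfind_append]
    simp only [List.length_append, List.length_cons, List.length_nil]
    by_cases hac : a = c
    · rw [if_pos hac]; constructor <;> push_cast <;> omega
    · rw [if_neg hac]; obtain ⟨h1, h2⟩ := ih; constructor
      · exact h1
      · push_cast; omega

def pvKeep (c : Char) : Bool := !(c == 'o' || c == 'x')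

theorem pv_drop_max_rfind (core : List Char) :
    core.drop ((max (PySem.Chars.rfind core ['o']) (PySem.Chars.rfind core ['x']) + 1)).toNat
      = ((core.reverse.takeWhile pvKeep)).reverse := by
  induction core using List.reverseRecOn with
  | nil => simp [pv_rfind_nil]
  | append_singleton t a ih =>
    rw [pv_rfind_append, pv_rfind_append, List.reverse_append]
    simp only [List.reverse_singleton, List.singleton_append, List.takeWhile_cons]
    by_cases ho : a = 'o'
    · subst ho
      have hx := pv_rfind_bounds t 'x'
      have hm : max ((t.length : Int)) (PySem.Chars.rfind t ['x']) = (t.length : Int) := by omega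
      rw [if_pos rfl, if_neg (by decide : ¬ ('o' = 'x'))]
      rw [hm]
      have : ((t.length : Int) + 1).toNat = t.length + 1 := by omega
      rw [this]
      simp [pvKeep, List.drop_eq_nil_of_le]
    · by_cases hx : a = 'x'
      · subst hx
        have ho' := pv_rfind_bounds t 'o'
        have hm : max (PySem.Chars.rfind t ['o']) ((t.length : Int)) = (t.length : Int) := by omega
        rw [if_neg (by decide : ¬ ('x' = 'o')), if_pos rfl]
        rw [hm]
        have : ((t.length : Int) + 1).toNat = t.length + 1 := by omega
        rw [this]
        simp [pvKeep, List.drop_eq_nil_of_le]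
      · have hkeep : pvKeep a = true := by simp [pvKeep]; exact ⟨ho, hx⟩
        rw [if_neg ho, if_neg hx, hkeep]
        simp only [if_true]
        have h1 := pv_rfind_bounds t 'o'
        have h2 := pv_rfind_bounds t 'x'
        have hle : ((max (PySem.Chars.rfind t ['o']) (PySem.Chars.rfind t ['x']) + 1)).toNat ≤ t.length := by omega
        rw [List.drop_append_of_le_length hle, ih]
        simp

theorem pv_scan_eq (cs : List Char) :
    ∀ (k : Nat) (acc : List Char), k + 2 ≤ cs.length →
      keyGetterScan cs (PySem.List.pyRange ((cs.length : Int) - k) (cs.length : Int) 1) acc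
        = acc ++ (((cs.drop 1).take k).reverse.takeWhile pvKeep) := by
  intro k
  induction k with
  | zero =>
    intro acc _
    rw [PySem.List.pyRange_one_eq_nil (by omega)]
    simp [keyGetterScan]
  | succ k ih =>
    intro acc hk
    have hn : k + 3 ≤ cs.length := by omega
    rw [PySem.List.pyRange_one_cons (by push_cast; omega)]
    have hidx : PySem.Chars.pyGet? cs (-(((cs.length : Int)) - (k+1))) = some (cs[k+1]'(by omega)) := by
      simp only [PySem.Chars.pyGet?, PySem.List.pyGet?, PySem.List.pyIdx?]
      have h1 : ¬ (0 ≤ -(((cs.length : Int)) - (k+1))) := by omega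
      rw [if_neg h1, if_pos (by push_cast; omega)]
      have h2 : cs.length - (-(-(((cs.length : Int)) - (k+1)))).toNat = k + 1 := by omega
      rw [h2]
      simp [List.getElem?_eq_getElem (by omega : k + 1 < cs.length)]
    have hseg : ((cs.drop 1).take (k+1)).reverse
        = (cs[k+1]'(by omega)) :: ((cs.drop 1).take k).reverse := by
      have hlt : k < (cs.drop 1).length := by simp; omega
      rw [List.take_succ, List.getElem?_eq_getElem hlt]
      simp [List.getElem_drop]
    rw [keyGetterScan]
    push_cast
    rw [hidx, hseg]
    simp only [List.takeWhile_cons]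
    by_cases hm : cs[k+1]'(by omega) = 'o' ∨ cs[k+1]'(by omega) = 'x'
    · rw [if_pos hm]
      have : pvKeep (cs[k+1]'(by omega)) = false := by
        simp [pvKeep]; rcases hm with h | h <;> simp [h]
      rw [this]
      simp
    · rw [if_neg hm]
      have hkeep : pvKeep (cs[k+1]'(by omega)) = true := by
        simp [pvKeep]; push_neg at hm; exact hm
      rw [hkeep]
      simp only [if_true]
      have harith : ((cs.length : Int)) - ((k : Int)+1) + 1 = ((cs.length : Int)) - k := by ring
      rw [harith, ih (acc ++ [cs[k+1]'(by omega)]) (by omega)]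
      simp

theorem pv_slice_core (cs : List Char) :
    PySem.Chars.slice cs (some 1) (some (-1)) = (cs.drop 1).take (cs.length - 2) := by
  simp only [PySem.Chars.slice, PySem.List.slice, PySem.List.clampIdx_neg_one]
  cases cs with
  | nil => simp
  | cons x xs =>
    have h1 : PySem.List.clampIdx (x :: xs).length 1 = 1 := by
      simp [PySem.List.clampIdx_natCast]
    rw [h1, Nat.sub_sub]

theorem pv_main (s : String) : key_getter s = key_getter_alt s := by
  simp only [key_getter]
  set cs := s.toList with hcs
  set core := (cs.drop 1).take (cs.length - 2) with hcore
  -- B side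
  have hBcore : (PySem.Str.slice s (some 1) (some (-1))).toList = core := by
    simp only [PySem.Str.slice, String.toList_ofList]
    exact pv_slice_core cs
  have hrfo : PySem.Str.rfind (PySem.Str.slice s (some 1) (some (-1))) "o"
      = PySem.Chars.rfind core ['o'] := by
    simp [PySem.Str.rfind, hBcore]
  have hrfx : PySem.Str.rfind (PySem.Str.slice s (some 1) (some (-1))) "x"
      = PySem.Chars.rfind core ['x'] := by
    simp [PySem.Str.rfind, hBcore]
  have hbound1 := pv_rfind_bounds core 'o'
  have hbound2 := pv_rfind_bounds core 'x'
  have hB : key_getter_alt s = String.ofList ((core.reverse.takeWhile pvKeep).reverse) := by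
    simp only [key_getter_alt]
    simp only [hrfo, hrfx]
    rw [show PySem.Str.slice (PySem.Str.slice s (some 1) (some (-1)))
          (some (max (PySem.Chars.rfind core ['o']) (PySem.Chars.rfind core ['x']) + 1)) none
        = String.ofList (PySem.Chars.slice (PySem.Str.slice s (some 1) (some (-1))).toList
          (some (max (PySem.Chars.rfind core ['o']) (PySem.Chars.rfind core ['x']) + 1)) none) from rfl]
    rw [hBcore]
    rw [show PySem.Chars.slice core
          (some (max (PySem.Chars.rfind core ['o']) (PySem.Chars.rfind core ['x']) + 1)) none
        = PySem.List.slice core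
          (some (max (PySem.Chars.rfind core ['o']) (PySem.Chars.rfind core ['x']) + 1)) none from rfl]
    rw [PySem.List.slice_from _ (by omega)]
    rw [pv_drop_max_rfind]
  -- A side
  have hch : keyGetterScan cs (PySem.List.pyRange 2 (PySem.Str.len s) 1) []
      = core.reverse.takeWhile pvKeep := by
    rw [PySem.Str.len_eq]
    rcases Nat.lt_or_ge cs.length 2 with h | h
    · rw [PySem.List.pyRange_one_eq_nil (by exact_mod_cast Nat.le_of_lt h)]
      have : core = [] := by
        rw [hcore]
        have : cs.length - 2 = 0 := by omega
        simp [this]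
      simp [keyGetterScan, this]
    · have := pv_scan_eq cs (cs.length - 2) [] (by omega)
      have h2 : ((cs.length : Int)) - ((cs.length - 2 : Nat) : Int) = 2 := by push_cast; omega
      rw [h2] at this
      rw [this]
      simp [hcore]
  rw [hch]
  -- the copy loops
  have hcopy : ∀ (l : List Char),
      (PySem.List.pyRange 0 (PySem.List.len l) 1).foldl
        (fun m i => m ++ [PySem.List.pyGetD l i ' ']) [] = l := by
    intro l
    rw [show PySem.List.len l = PySem.List.len l from rfl]
    rw [PySem.List.foldl_pyRange_zero_pyGetD l ' ' (fun m c => m ++ [c]) []]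
    rw [PySem.List.foldl_append_singleton]
    simp
  rw [hcopy, hcopy]
  rw [hB]

-- ===== VERDICT (by name: the statement is the Claim_ definition above) =====
theorem key_getter_spec : Claim_equal_key_getter := by
  intro s _
  exact pv_main s
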